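-- pv_equiv track=rewrite | github.com/kyobankatu/ZZZ-Translator | src/get_data_xml.py | parse_template_params
-- ===== SOURCE A (Python) =====
-- def parse_template_params(template_text):
--     """
--     テンプレート文字列からパラメータを辞書形式で抽出する
--     例: {{Other Languages|en=Name|ja=名前}} -> {'en': 'Name', 'ja': '名前'}
--     """
--     content = template_text[2:-2]
--
--     params = {}
--     parts = content.split('|')
--
--     for part in parts:
--         if '=' in part:
--             key, val = part.split('=', 1)
--             params[key.strip()] = val.strip()
--
--     return params
-- ===== SOURCE B (Python) =====
-- def parse_template_params(template_text):
--     content = template_text[2:-2]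
--     params = {}
--     key = []
--     val = None
--     for ch in content:
--         if ch == '|':
--             if val is not None:
--                 params[''.join(key).strip()] = ''.join(val).strip()
--             key = []
--             val = None
--         elif ch == '=' and val is None:
--             val = []
--         elif val is None:
--             key.append(ch)
--         else:
--             val.append(ch)
--     if val is not None:
--         params[''.join(key).strip()] = ''.join(val).strip()
--     return params
-- ===== Notes on version B (the rewrite author's own statement) =====
-- stated objective: alternative
-- what changed: B replaces A's split on the separator character plus a per-part first-occurrence split with a single character-by-character scan that builds key/value buffers and flushes a pair at each separator and at the end, never materialising the intermediate part lists.
import Mathlib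
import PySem

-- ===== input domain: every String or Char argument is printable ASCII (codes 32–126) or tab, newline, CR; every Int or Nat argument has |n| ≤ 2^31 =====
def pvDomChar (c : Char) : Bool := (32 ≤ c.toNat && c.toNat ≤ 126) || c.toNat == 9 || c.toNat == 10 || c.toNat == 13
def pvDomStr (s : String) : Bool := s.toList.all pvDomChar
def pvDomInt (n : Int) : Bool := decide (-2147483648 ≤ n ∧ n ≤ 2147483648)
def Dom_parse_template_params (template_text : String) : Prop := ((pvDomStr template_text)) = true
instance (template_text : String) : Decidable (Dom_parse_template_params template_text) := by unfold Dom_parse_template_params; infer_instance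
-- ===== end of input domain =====

-- B replaces split('|') + split('=',1) with a single character scan that builds key/value buffers directly (objective: alternative, one pass without intermediate part lists).

-- ===== PORT A =====
-- one iteration of A's 'for part in parts' loop
def pvAStep (d : PySem.Dict String String) (part : List Char) : PySem.Dict String String :=
  if PySem.Chars.isIn ['='] part then
    match PySem.Chars.splitOnMax part ['='] 1 with
    | [key, val] => d.insert (String.ofList (PySem.Chars.strip key)) (String.ofList (PySem.Chars.strip val))
    | _ => d
  else d

def parse_template_params (template_text : String) : List (String × String) :=
  let content := PySem.List.slice template_text.toList (some 2) (some (-2))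
  let parts := PySem.Chars.splitOn content ['|']
  (parts.foldl pvAStep PySem.Dict.empty).items

-- ===== PORT B =====
-- flush at '|' / end of scan: record the pending key=value pair, if any
def pvFlush (d : PySem.Dict String String) (key : List Char) (val : Option (List Char)) :
    PySem.Dict String String :=
  match val with
  | none => d
  | some v => d.insert (String.ofList (PySem.Chars.strip key)) (String.ofList (PySem.Chars.strip v))

-- one character of B's scan
def pvBStep (st : PySem.Dict String String × List Char × Option (List Char)) (ch : Char) :
    PySem.Dict String String × List Char × Option (List Char) :=
  match st with
  | (d, key, val) =>
    if ch = '|' then (pvFlush d key val, [], none)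
    else if ch = '=' ∧ val = none then (d, key, some [])
    else match val with
      | none => (d, key ++ [ch], none)
      | some v => (d, key, some (v ++ [ch]))

def parse_template_params_alt (template_text : String) : List (String × String) :=
  let content := PySem.List.slice template_text.toList (some 2) (some (-2))
  match content.foldl pvBStep (PySem.Dict.empty, [], none) with
  | (d, key, val) => (pvFlush d key val).items

-- ===== PRECONDITION & SPEC =====
def Spec_parse_template_params (template_text : String) (out : List (String × String)) : Prop := out = parse_template_params_alt template_text
instance (template_text : String) (out : List (String × String)) : Decidable (Spec_parse_template_params template_text out) := by unfold Spec_parse_template_params; infer_instance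

-- ===== CLAIM (what is proved, stated in full; the proofs are below) =====
def Claim_equal_parse_template_params : Prop := ∀ (template_text : String), Dom_parse_template_params template_text → Spec_parse_template_params template_text (parse_template_params template_text)

-- ===== LEMMAS AND PROOFS =====

-- split on a single character, structurally
def pvSplit1 (c : Char) : List Char → List (List Char)
  | [] => [[]]
  | x :: xs =>
    if x = c then [] :: pvSplit1 c xs
    else match pvSplit1 c xs with
      | [] => [[x]]
      | h :: t => (x :: h) :: t

def pvConsHead (pre : List Char) : List (List Char) → List (List Char)
  | [] => [pre]
  | h :: t => (pre ++ h) :: t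

lemma pvSplit1_ne_nil (c : Char) (cs : List Char) : pvSplit1 c cs ≠ [] := by
  induction cs with
  | nil => simp [pvSplit1]
  | cons x xs ih =>
    simp only [pvSplit1]
    split
    · simp
    · cases h : pvSplit1 c xs <;> simp

lemma pvGo_spec (c : Char) : ∀ (fuel : Nat) (l cur : List Char) (hacc : List (List Char)),
    l.length < fuel →
    PySem.Chars.splitOn.go [c] fuel l cur hacc =
      hacc.reverse ++ pvConsHead cur.reverse (pvSplit1 c l) := by
  intro fuel
  induction fuel with
  | zero => intro l cur hacc h; omega
  | succ n ih =>
    intro l cur hacc h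
    cases l with
    | nil => simp [PySem.Chars.splitOn.go, pvSplit1, pvConsHead]
    | cons x rest =>
      rw [PySem.Chars.splitOn.go]
      by_cases hx : x = c
      · subst hx
        simp only [List.isPrefixOf, BEq.rfl, Bool.true_and, if_pos]
        rw [show List.drop [x].length (x :: rest) = rest by simp]
        rw [ih rest [] ((cur.reverse :: hacc)) (by simpa using Nat.lt_of_succ_lt_succ h)]
        simp only [pvSplit1]
        cases hs : pvSplit1 x rest with
        | nil => exact absurd hs (pvSplit1_ne_nil x rest)
        | cons hh tt => simp [pvConsHead]
      · have hpre : [c].isPrefixOf (x :: rest) = false := by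
          simp [List.isPrefixOf]
          exact fun hc => (hx hc.symm).elim
        rw [hpre]
        simp only [Bool.false_eq_true, if_false]
        rw [ih rest (x :: cur) hacc (by simpa using Nat.lt_of_succ_lt_succ h)]
        simp only [pvSplit1, if_neg hx]
        cases hs : pvSplit1 c rest with
        | nil => exact absurd hs (pvSplit1_ne_nil c rest)
        | cons hh tt => simp [pvConsHead]

lemma pvSplitOn_single (c : Char) (cs : List Char) :
    PySem.Chars.splitOn cs [c] = pvConsHead [] (pvSplit1 c cs) := by
  unfold PySem.Chars.splitOn
  simpa using pvGo_spec c (cs.length + 1) cs [] [] (by omega)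

lemma pvGoMax_zero (c : Char) : ∀ (fuel : Nat) (l cur : List Char) (hacc : List (List Char)),
    l.length < fuel →
    PySem.Chars.splitOnMax.go [c] fuel 0 l cur hacc = hacc.reverse ++ [cur.reverse ++ l] := by
  intro fuel
  cases fuel with
  | zero => intro l cur hacc h; omega
  | succ n =>
    intro l cur hacc h
    cases l with
    | nil => simp [PySem.Chars.splitOnMax.go]
    | cons x rest => rw [PySem.Chars.splitOnMax.go]; simp

lemma pvGoMax_one (c : Char) : ∀ (fuel : Nat) (l cur : List Char) (hacc : List (List Char)),
    l.length < fuel → c ∈ l →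
    PySem.Chars.splitOnMax.go [c] fuel 1 l cur hacc =
      hacc.reverse ++ [cur.reverse ++ l.takeWhile (· ≠ c), (l.dropWhile (· ≠ c)).tail] := by
  intro fuel
  induction fuel with
  | zero => intro l cur hacc h; omega
  | succ n ih =>
    intro l cur hacc h hmem
    cases l with
    | nil => simp at hmem
    | cons x rest =>
      rw [PySem.Chars.splitOnMax.go]
      simp only [Nat.one_ne_zero, if_false]
      by_cases hx : x = c
      · subst hx
        simp only [List.isPrefixOf, BEq.rfl, Bool.true_and, if_pos]
        rw [show List.drop [x].length (x :: rest) = rest by simp]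
        rw [show (1 : Nat) - 1 = 0 by omega]
        rw [pvGoMax_zero x n rest [] (cur.reverse :: hacc) (by simpa using Nat.lt_of_succ_lt_succ h)]
        simp [List.dropWhile]
      · have hpre : [c].isPrefixOf (x :: rest) = false := by
          simp [List.isPrefixOf]
          exact fun hc => (hx hc.symm).elim
        rw [hpre]
        simp only [Bool.false_eq_true, if_false]
        have hmem' : c ∈ rest := by cases hmem with
          | head => exact absurd rfl hx
          | tail _ hm => exact hm
        rw [ih rest (x :: cur) hacc (by simpa using Nat.lt_of_succ_lt_succ h) hmem']
        simp [hx]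

lemma pvSplitOnMax_one (c : Char) (part : List Char) (h : c ∈ part) :
    PySem.Chars.splitOnMax part [c] 1 =
      [part.takeWhile (· ≠ c), (part.dropWhile (· ≠ c)).tail] := by
  unfold PySem.Chars.splitOnMax
  rw [if_neg (by omega)]
  rw [show (1 : Int).toNat = 1 from rfl]
  simpa using pvGoMax_one c (part.length + 1) part [] [] (by omega) h

lemma pvIsIn_single (c : Char) (s : List Char) :
    PySem.Chars.isIn [c] s = true ↔ c ∈ s := by
  rw [PySem.Chars.isIn_iff_infix]
  constructor
  · rintro ⟨p, q, hpq⟩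
    rw [← hpq]; simp
  · intro hm
    rcases List.append_of_mem hm with ⟨p, q, rfl⟩
    exact ⟨p, q, by simp⟩

lemma pvTakeDrop (v : List Char) : ∀ (key : List Char), ('=' : Char) ∉ key →
    (key ++ '=' :: v).takeWhile (· ≠ '=') = key ∧
    ((key ++ '=' :: v).dropWhile (· ≠ '=')).tail = v := by
  intro key
  induction key with
  | nil => intro _; simp [List.takeWhile, List.dropWhile]
  | cons x xs ih =>
    intro hk
    have hx : x ≠ '=' := fun h => hk (h ▸ List.mem_cons_self)
    have hxs : ('=' : Char) ∉ xs := fun h => hk (List.mem_cons_of_mem _ h)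
    obtain ⟨h1, h2⟩ := ih hxs
    simp only [ne_eq, decide_not] at h1 h2 ⊢
    simp [List.takeWhile_cons, hx, h1, h2]

lemma pvAStep_no (d : PySem.Dict String String) (part : List Char) (h : ('=' : Char) ∉ part) :
    pvAStep d part = d := by
  unfold pvAStep
  rw [if_neg]
  intro hin
  exact h ((pvIsIn_single '=' part).mp hin)

lemma pvAStep_yes (d : PySem.Dict String String) (key v : List Char) (hk : ('=' : Char) ∉ key) :
    pvAStep d (key ++ '=' :: v) =
      d.insert (String.ofList (PySem.Chars.strip key)) (String.ofList (PySem.Chars.strip v)) := by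
  unfold pvAStep
  have hmem : ('=' : Char) ∈ key ++ '=' :: v := by simp
  rw [if_pos ((pvIsIn_single '=' _).mpr hmem)]
  rw [pvSplitOnMax_one '=' _ hmem]
  obtain ⟨h1, h2⟩ := pvTakeDrop v key hk
  rw [h1, h2]

-- reconstruction of the segment text B's state (key, val) has consumed so far
def pvRecon (key : List Char) : Option (List Char) → List Char
  | none => key
  | some v => key ++ '=' :: v

lemma pvAStep_recon (d : PySem.Dict String String) (key : List Char)
    (val : Option (List Char)) (hk : ('=' : Char) ∉ key) :
    pvAStep d (pvRecon key val) = pvFlush d key val := by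
  cases val with
  | none => exact pvAStep_no d key hk
  | some v => exact pvAStep_yes d key v hk

def pvFinish (st : PySem.Dict String String × List Char × Option (List Char)) :
    PySem.Dict String String :=
  pvFlush st.1 st.2.1 st.2.2

lemma pvMain : ∀ (cs : List Char) (d : PySem.Dict String String)
    (key : List Char) (val : Option (List Char)), ('=' : Char) ∉ key →
    pvFinish (cs.foldl pvBStep (d, key, val)) =
    (pvConsHead (pvRecon key val) (pvSplit1 '|' cs)).foldl pvAStep d := by
  intro cs
  induction cs with
  | nil =>
    intro d key val hk
    simp only [List.foldl_nil, pvSplit1, pvConsHead, List.foldl_cons, List.foldl_nil]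
    rw [List.append_nil, pvAStep_recon d key val hk]
    rfl
  | cons ch rest ih =>
    intro d key val hk
    simp only [List.foldl_cons]
    by_cases hpipe : ch = '|'
    · subst hpipe
      rw [show pvBStep (d, key, val) '|' = (pvFlush d key val, [], none) by
        simp [pvBStep]]
      have hsp : pvSplit1 '|' ('|' :: rest) = [] :: pvSplit1 '|' rest := by
        simp [pvSplit1]
      rw [hsp, ih (pvFlush d key val) [] none (by simp)]
      cases hs : pvSplit1 '|' rest with
      | nil => exact absurd hs (pvSplit1_ne_nil '|' rest)
      | cons h t =>
        rw [show pvConsHead (pvRecon key val) ([] :: h :: t) = pvRecon key val :: h :: t by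
          simp [pvConsHead]]
        rw [List.foldl_cons, pvAStep_recon d key val hk]
        simp [pvConsHead, pvRecon]
    · have hsp : pvSplit1 '|' (ch :: rest) =
          match pvSplit1 '|' rest with
          | [] => [[ch]]
          | h :: t => (ch :: h) :: t := by
        simp [pvSplit1, hpipe]
      cases hs : pvSplit1 '|' rest with
      | nil => exact absurd hs (pvSplit1_ne_nil '|' rest)
      | cons h t =>
        rw [hsp, hs]
        cases val with
        | none =>
          by_cases heq : ch = '='
          · subst heq
            rw [show pvBStep (d, key, none) '=' = (d, key, some []) by
              simp [pvBStep, hpipe]]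
            rw [ih d key (some []) hk, hs]
            simp [pvConsHead, pvRecon]
          · rw [show pvBStep (d, key, none) ch = (d, key ++ [ch], none) by
              simp [pvBStep, hpipe, heq]]
            have hk' : ('=' : Char) ∉ key ++ [ch] := by
              simp [hk]
              exact fun hc => heq hc.symm
            rw [ih d (key ++ [ch]) none hk', hs]
            simp [pvConsHead, pvRecon]
        | some v =>
          rw [show pvBStep (d, key, some v) ch = (d, key, some (v ++ [ch])) by
            simp [pvBStep, hpipe]]
          rw [ih d key (some (v ++ [ch])) hk, hs]
          simp [pvConsHead, pvRecon]

-- ===== VERDICT (by name: the statement is the Claim_ definition above) =====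
theorem parse_template_params_spec : Claim_equal_parse_template_params := by
  intro template_text _
  unfold Spec_parse_template_params
  have key : ∀ (content : List Char),
      (List.foldl pvAStep PySem.Dict.empty (PySem.Chars.splitOn content ['|'])).items =
      (pvFinish (content.foldl pvBStep (PySem.Dict.empty, [], none))).items := by
    intro content
    rw [pvSplitOn_single '|' content, pvMain content PySem.Dict.empty [] none (by simp)]
    cases hs : pvSplit1 '|' content with
    | nil => exact absurd hs (pvSplit1_ne_nil '|' content)
    | cons h t => simp [pvConsHead, pvRecon]
  exact key (PySem.List.slice template_text.toList (some 2) (some (-2)))
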